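-- pv_equiv track=rewrite | github.com/Aqua3k/TestCaseRunner | DebugMain.py | GetScoreFromStandardOutput
-- ===== SOURCE A (Python) =====
-- def GetScoreFromStandardOutput(string: str) -> int:
--     """標準出力から得点を取り出す
--
--     Args:
--         string(str): 得点を取り出す元の文字列
--     Returns:
--         int: 得点
--     """
--     u = string.lower()
--     if "score" in u:
--         idx = u.index("score")
--     else:
--         idx = 0
--     s = ""
--     flg = False
--     for t in u[idx:]:
--         if "0" <= t <= "9":
--             s += t
--             flg = True
--         else:
--             if flg: break
--     try   : ret = int(s)
--     except: ret = 0
--     return ret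
-- ===== SOURCE B (Python) =====
-- def GetScoreFromStandardOutput(string: str) -> int:
--     u = string.lower()
--     rest = u[max(u.find("score"), 0):]
--     runs = "".join(c if "0" <= c <= "9" else " " for c in rest).split()
--     return int(runs[0]) if runs else 0
-- ===== Notes on version B (the rewrite author's own statement) =====
-- stated objective: alternative
-- what changed: A scans character by character with a flag and a break, accumulating digits into a string converted inside try/except; B masks every non-digit of the tail after 'score' to a space, tokenizes with str.split(), and returns int of the first token (0 if there is none) - the digit-run extraction is delegated to the whitespace tokenizer instead of an explicit stateful scan.
import Mathlib
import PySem

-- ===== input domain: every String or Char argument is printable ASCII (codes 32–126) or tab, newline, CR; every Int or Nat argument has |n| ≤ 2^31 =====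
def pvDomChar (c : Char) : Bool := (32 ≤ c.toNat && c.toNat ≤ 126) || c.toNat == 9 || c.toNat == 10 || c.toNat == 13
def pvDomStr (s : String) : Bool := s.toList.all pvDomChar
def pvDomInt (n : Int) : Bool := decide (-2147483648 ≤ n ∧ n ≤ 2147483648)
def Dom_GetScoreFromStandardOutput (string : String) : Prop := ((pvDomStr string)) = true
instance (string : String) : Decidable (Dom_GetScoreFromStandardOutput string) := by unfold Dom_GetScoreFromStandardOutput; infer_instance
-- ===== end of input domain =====

-- B replaces A's char-by-char accumulation loop (flag, break, try/except) by masking every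
-- non-digit to a space and letting str.split() tokenize; the first token is the score — simpler.

-- shared trivial predicate: Python's  "0" <= t <= "9"  on a single character
def pvIsDig (c : Char) : Bool := decide ('0' ≤ c ∧ c ≤ '9')

-- ===== PORT A =====
-- the for-loop of A: state (s, flg), break modelled by returning s
def pvA_loop : List Char → List Char → Bool → List Char
  | [], s, _ => s
  | t :: ts, s, flg =>
    if pvIsDig t then pvA_loop ts (s ++ [t]) true
    else if flg then s else pvA_loop ts s flg

def GetScoreFromStandardOutput (string : String) : Int :=
  let u := PySem.Str.lower string
  let idx : Int := if PySem.Str.isIn "score" u then PySem.Str.find u "score" else 0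
  let s := pvA_loop (PySem.Str.slice u (some idx) none).toList [] false
  (PySem.Int.ofStr? (String.ofList s)).getD 0   -- try: int(s) / except: 0

-- ===== PORT B =====
-- mask of one character:  c if "0" <= c <= "9" else " "
def pvMask (c : Char) : Char := if pvIsDig c then c else ' '

def GetScoreFromStandardOutput_alt (string : String) : Int :=
  let u := PySem.Str.lower string
  let rest := PySem.Str.slice u (some (max (PySem.Str.find u "score") 0)) none
  let runs := PySem.Str.split₀ (String.ofList (rest.toList.map pvMask))
  match runs with
  | [] => 0
  | t :: _ => (PySem.Int.ofStr? t).getD 0   -- int(runs[0]); a nonempty digit run, never raises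

-- ===== PRECONDITION & SPEC =====
def Spec_GetScoreFromStandardOutput (string : String) (out : Int) : Prop := out = GetScoreFromStandardOutput_alt string
instance (string : String) (out : Int) : Decidable (Spec_GetScoreFromStandardOutput string out) := by unfold Spec_GetScoreFromStandardOutput; infer_instance

-- ===== CLAIM (what is proved, stated in full; the proofs are below) =====
def Claim_equal_GetScoreFromStandardOutput : Prop := ∀ (string : String), Dom_GetScoreFromStandardOutput string → Spec_GetScoreFromStandardOutput string (GetScoreFromStandardOutput string)

-- ===== LEMMAS AND PROOFS =====

-- A's loop with flg = true appends exactly the leading digit run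
theorem pvA_loop_true (cs acc : List Char) :
    pvA_loop cs acc true = acc ++ cs.takeWhile pvIsDig := by
  induction cs generalizing acc with
  | nil => simp [pvA_loop]
  | cons c cs ih =>
    by_cases h : pvIsDig c
    · simp [pvA_loop, h, ih]
    · simp [pvA_loop, h]

-- A's loop from the initial state: skip non-digits, then take the digit run
theorem pvA_loop_spec (cs : List Char) :
    pvA_loop cs [] false = (cs.dropWhile (fun c => !pvIsDig c)).takeWhile pvIsDig := by
  induction cs with
  | nil => simp [pvA_loop]
  | cons c cs ih =>
    by_cases h : pvIsDig c
    · simp [pvA_loop, h, pvA_loop_true]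
    · simp [pvA_loop, h, ih]

-- a digit is not whitespace
theorem pvIsDig_not_space (c : Char) (h : pvIsDig c = true) :
    PySem.Chars.isspace c = false := by
  have h1 : '0' ≤ c ∧ c ≤ '9' := by simpa [pvIsDig] using h
  have h2 : 48 ≤ c.toNat ∧ c.toNat ≤ 57 := by
    rw [Char.le_def, Char.le_def] at h1
    exact ⟨h1.1, h1.2⟩
  simp only [PySem.Chars.isspace, Bool.or_eq_false_iff, Bool.and_eq_false_iff,
    decide_eq_false_iff_not]
  omega

-- definitional equations of the whitespace tokenizer's worker
theorem pv_go_cons (c : Char) (ms cur : List Char) (acc : List (List Char)) :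
    PySem.Chars.split₀.go (c :: ms) cur acc =
      if PySem.Chars.isspace c then
        (if cur.isEmpty then PySem.Chars.split₀.go ms [] acc
         else PySem.Chars.split₀.go ms [] (cur.reverse :: acc))
      else PySem.Chars.split₀.go ms (c :: cur) acc := rfl

theorem pv_go_nil (cur : List Char) (acc : List (List Char)) :
    PySem.Chars.split₀.go [] cur acc =
      if cur.isEmpty then acc.reverse else (cur.reverse :: acc).reverse := rfl

-- the tokenizer's accumulator: completed tokens in acc come out reversed in front
theorem pv_go_acc (ms cur : List Char) (acc : List (List Char)) :
    PySem.Chars.split₀.go ms cur acc = acc.reverse ++ PySem.Chars.split₀.go ms cur [] := by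
  induction ms generalizing cur acc with
  | nil =>
    by_cases h : cur.isEmpty <;> simp [pv_go_nil, h]
  | cons c ms ih =>
    rw [pv_go_cons, pv_go_cons]
    by_cases h : PySem.Chars.isspace c
    · by_cases hc : cur.isEmpty
      · simp only [h, hc, if_true]
        exact ih [] acc
      · simp only [h, hc, if_true, if_false, Bool.false_eq_true]
        rw [ih [] (cur.reverse :: acc), ih [] [cur.reverse]]
        simp
    · simp only [h, Bool.false_eq_true, if_false]
      exact ih (c :: cur) acc

-- skipping phase: masked non-digits are spaces and are dropped while cur = []
theorem pv_go_skip (cs : List Char) :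
    PySem.Chars.split₀.go (cs.map pvMask) [] [] =
      PySem.Chars.split₀.go ((cs.dropWhile (fun c => !pvIsDig c)).map pvMask) [] [] := by
  induction cs with
  | nil => simp
  | cons c cs ih =>
    by_cases h : pvIsDig c
    · simp [h]
    · have hsp : PySem.Chars.isspace (pvMask c) = true := by
        simp only [pvMask, h, Bool.false_eq_true, if_false]
        decide
      simp only [List.map_cons, List.dropWhile_cons, h]
      rw [pv_go_cons]
      simp [hsp, ih]

-- accumulating phase: a block of digits is pushed (reversed) onto cur
theorem pv_go_digits (d : List Char) (hd : ∀ c ∈ d, pvIsDig c = true) :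
    ∀ (rest cur : List Char),
      PySem.Chars.split₀.go (d.map pvMask ++ rest) cur [] =
        PySem.Chars.split₀.go rest (d.reverse ++ cur) [] := by
  induction d with
  | nil => intro rest cur; simp
  | cons c d ih =>
    intro rest cur
    have hc : pvIsDig c = true := hd c (by simp)
    have hmask : pvMask c = c := by simp [pvMask, hc]
    have hns : PySem.Chars.isspace c = false := pvIsDig_not_space c hc
    simp only [List.map_cons, List.cons_append, hmask]
    rw [pv_go_cons]
    simp only [hns, Bool.false_eq_true, if_false]
    rw [ih (fun x hx => hd x (by simp [hx])) rest (c :: cur)]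
    simp

-- the first token of the masked-and-split string is the leading digit run (when nonempty)
theorem pv_split_mask (cs : List Char) :
    PySem.Chars.split₀ (cs.map pvMask) =
      (let run := (cs.dropWhile (fun c => !pvIsDig c)).takeWhile pvIsDig
       if run.isEmpty then [] else
         run :: PySem.Chars.split₀ (((cs.dropWhile (fun c => !pvIsDig c)).dropWhile pvIsDig).map pvMask)) := by
  simp only [PySem.Chars.split₀]
  rw [pv_go_skip]
  set tl := cs.dropWhile (fun c => !pvIsDig c) with htl
  set run := tl.takeWhile pvIsDig with hrun
  have hrd : ∀ c ∈ run, pvIsDig c = true := fun c hc => List.mem_takeWhile_imp hc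
  by_cases he : run.isEmpty
  · -- no digit: tl itself is empty (its head, if any, is a digit)
    have : tl = [] := by
      cases h : tl with
      | nil => rfl
      | cons c l =>
        exfalso
        have hdig : pvIsDig c = true := by
          have := List.head?_dropWhile_not (fun c => !pvIsDig c) cs
          rw [← htl, h] at this
          simpa using this
        rw [h] at hrun
        simp [hdig] at hrun
        simp [hrun] at he
    simp [this, he, pv_go_nil]
  · -- digit run nonempty: consume it, then either end of string or a masked space
    have hsplit : tl = run ++ tl.dropWhile pvIsDig := by
      rw [hrun]; exact (List.takeWhile_append_dropWhile).symm
    conv_lhs => rw [hsplit]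
    rw [List.map_append, pv_go_digits run hrd]
    simp only [he, Bool.false_eq_true, if_false]
    have hcur : (run.reverse ++ ([] : List Char)).isEmpty = false := by
      simp only [List.append_nil, List.isEmpty_reverse]
      simpa using he
    cases h : tl.dropWhile pvIsDig with
    | nil =>
      simp only [List.map_nil]
      rw [pv_go_nil]
      simp only [List.reverse_cons, List.reverse_nil,
        List.nil_append, List.append_nil, List.reverse_reverse, pv_go_nil, List.isEmpty_nil,
        if_true]
      simpa [List.isEmpty_iff] using he
    | cons c l =>
      have hnd : pvIsDig c = false := by
        have := List.head?_dropWhile_not pvIsDig tl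
        rw [h] at this
        simpa using this
      have hsp : PySem.Chars.isspace (pvMask c) = true := by
        simp only [pvMask, hnd, Bool.false_eq_true, if_false]
        decide
      simp only [List.map_cons]
      rw [pv_go_cons]
      simp only [hsp, if_true, hcur, Bool.false_eq_true, if_false]
      rw [pv_go_acc]
      conv_rhs => rw [pv_go_cons]
      simp [hsp]

-- ===== VERDICT (by name: the statement is the Claim_ definition above) =====
theorem GetScoreFromStandardOutput_spec : Claim_equal_GetScoreFromStandardOutput := by
  intro string _
  unfold Spec_GetScoreFromStandardOutput GetScoreFromStandardOutput GetScoreFromStandardOutput_alt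
  simp only []
  set u := PySem.Str.lower string with hu
  have htail : (if PySem.Str.isIn "score" u then PySem.Str.find u "score" else (0 : Int))
      = max (PySem.Str.find u "score") 0 := by
    by_cases h : PySem.Chars.isIn ['s', 'c', 'o', 'r', 'e'] u.toList = true
    · have hpos : 0 ≤ PySem.Chars.find u.toList ['s', 'c', 'o', 'r', 'e'] :=
        (PySem.Chars.find_nonneg_iff _ _).2 ((PySem.Chars.isIn_iff_infix _ _).1 h)
      simp [h, max_eq_left hpos]
    · have hneg : PySem.Chars.find u.toList ['s', 'c', 'o', 'r', 'e'] = -1 :=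
        (PySem.Chars.find_eq_neg_one_iff _ _).2 ((PySem.Chars.isIn_eq_false_iff _ _).1 (by simpa using h))
      simp [h, hneg]
  rw [htail]
  set cs := (PySem.Str.slice u (some (max (PySem.Str.find u "score") 0)) none).toList with hcs
  rw [pvA_loop_spec]
  simp only [PySem.Str.split₀, String.toList_ofList]
  rw [pv_split_mask]
  set run := (cs.dropWhile (fun c => !pvIsDig c)).takeWhile pvIsDig with hrun
  by_cases he : run.isEmpty
  · -- no digit run: A's s is "", int("") raises → 0; B's token list is empty → 0
    simp only [he, if_true]
    rw [List.isEmpty_iff] at he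
    rw [he]
    decide
  · simp [he]
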